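-- pv_equiv track=rewrite | github.com/TokiKurumi/7015_NLP | SentimentAnalysis/data_loader.py | text_to_sequence
-- ===== SOURCE A (Python) =====
-- def text_to_sequence(text, vocab, max_len=None):
--     words = text.split()
--     # 第二步：词汇表查找，将单词转换为索引, word=找到对应索引,未找到则为'<UNK>'
--     sequence = [vocab.get(word, vocab['<UNK>']) for word in words]
--
--     if max_len:
--         # 截断：保留前max_len个词
--         if len(sequence) > max_len:
--             sequence = sequence[:max_len]  # 截断
--         else:
--             # 填充：在末尾添加<PAD>直到达到max_len
--             sequence = sequence + [vocab['<PAD>']] * (max_len - len(sequence))  # 填充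
--     return sequence
-- ===== SOURCE B (Python) =====
-- def text_to_sequence(text, vocab, max_len=None):
--     words = text.split()
--     if not max_len:
--         return [vocab.get(w, vocab['<UNK>']) for w in words]
--     n = len(words)
--     return [vocab.get(words[i], vocab['<UNK>']) if i < n else vocab['<PAD>']
--             for i in range(max_len)]
-- ===== Notes on version B (the rewrite author's own statement) =====
-- stated objective: simpler
-- what changed: Instead of building the full index list and then reshaping it with a truncating slice or a pad-concatenation branch, B produces the result in one position-indexed comprehension over range(max_len), choosing a word lookup or the PAD index per output position.
-- outside the precondition, e.g. on text_to_sequence('a b c', {'a': 1, 'b': 2, 'c': 3, '<UNK>': 0, '<PAD>': 4}, -1): A returns [1, 2], B returns []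
import Mathlib
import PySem

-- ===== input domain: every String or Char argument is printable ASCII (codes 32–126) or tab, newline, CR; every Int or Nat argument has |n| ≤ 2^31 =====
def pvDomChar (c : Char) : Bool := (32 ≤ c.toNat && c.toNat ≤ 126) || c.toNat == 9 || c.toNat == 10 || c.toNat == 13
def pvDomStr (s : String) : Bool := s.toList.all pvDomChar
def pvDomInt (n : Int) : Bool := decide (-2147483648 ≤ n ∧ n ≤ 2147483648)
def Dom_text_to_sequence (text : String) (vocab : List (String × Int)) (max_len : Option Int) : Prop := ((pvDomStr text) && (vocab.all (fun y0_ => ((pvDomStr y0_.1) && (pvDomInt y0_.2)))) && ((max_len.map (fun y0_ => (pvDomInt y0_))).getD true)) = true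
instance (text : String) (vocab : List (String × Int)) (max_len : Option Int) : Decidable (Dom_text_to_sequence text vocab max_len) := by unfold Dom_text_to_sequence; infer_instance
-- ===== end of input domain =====

-- B replaces A's build-then-reshape (full lookup list, then truncating slice or pad-concatenation)
-- by a single position-indexed comprehension over range(max_len); same return value, no speed claim.


-- ===== PORT A =====
def text_to_sequence (text : String) (vocab : List (String × Int)) (max_len : Option Int) : List Int :=
  let d := PySem.Dict.mk vocab
  let words := PySem.Str.split₀ text
  -- vocab.get(word, vocab['<UNK>']); vocab['<UNK>'] raises KeyError if absent — Pre_ requires it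
  -- whenever words is nonempty, so the total default .getD 0 is never exposed inside Pre_.
  let sequence := words.map (fun w => PySem.Dict.getD d w ((PySem.Dict.get? d "<UNK>").getD 0))
  match max_len with
  | none => sequence
  | some m =>
    if m ≠ 0 then                                   -- `if max_len:` (0 is falsy)
      if (sequence.length : Int) > m then
        PySem.List.slice sequence none (some m)     -- sequence[:max_len]
      else
        sequence ++ List.replicate (m - (sequence.length : Int)).toNat
          ((PySem.Dict.get? d "<PAD>").getD 0)      -- vocab['<PAD>'] required by Pre_ here
    else sequence

-- ===== PORT B =====
def text_to_sequence_alt (text : String) (vocab : List (String × Int)) (max_len : Option Int) : List Int :=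
  let d := PySem.Dict.mk vocab
  let words := PySem.Str.split₀ text
  match max_len with
  | some m =>
    if m ≠ 0 then
      (PySem.List.pyRange 0 m 1).map (fun i =>
        if i < (words.length : Int) then
          PySem.Dict.getD d (PySem.List.pyGetD words i "") ((PySem.Dict.get? d "<UNK>").getD 0)
        else (PySem.Dict.get? d "<PAD>").getD 0)
    else words.map (fun w => PySem.Dict.getD d w ((PySem.Dict.get? d "<UNK>").getD 0))
  | none => words.map (fun w => PySem.Dict.getD d w ((PySem.Dict.get? d "<UNK>").getD 0))

-- ===== PRECONDITION & SPEC =====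
-- Pre_ excludes (a) inputs where A raises KeyError: '<UNK>' missing with a nonempty word list, or
-- '<PAD>' missing when the padding branch is reached; and (b) negative max_len with -max_len < len(words),
-- an unspecified corner where A's `sequence[:max_len]` keeps a tail-dropped prefix while B's range(max_len)
-- is empty (negative max_len with -max_len ≥ len(words) stays inside the claim: both return []).
def Pre_text_to_sequence (text : String) (vocab : List (String × Int)) (max_len : Option Int) : Prop :=
  (PySem.Str.split₀ text = [] ∨ (PySem.Dict.mk vocab).contains "<UNK>" = true) ∧
  (0 ≤ max_len.getD 0 ∨ ((PySem.Str.split₀ text).length : Int) + max_len.getD 0 ≤ 0) ∧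
  (0 < max_len.getD 0 → ((PySem.Str.split₀ text).length : Int) ≤ max_len.getD 0 →
      (PySem.Dict.mk vocab).contains "<PAD>" = true)
instance (text : String) (vocab : List (String × Int)) (max_len : Option Int) : Decidable (Pre_text_to_sequence text vocab max_len) := by unfold Pre_text_to_sequence; infer_instance

def pvWitness_text_to_sequence : String × (List (String × Int)) × Option Int :=
  ("a b", [("a", 1), ("b", 2), ("<UNK>", 0), ("<PAD>", 3)], some 4)

def Spec_text_to_sequence (text : String) (vocab : List (String × Int)) (max_len : Option Int) (out : List Int) : Prop := out = text_to_sequence_alt text vocab max_len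
instance (text : String) (vocab : List (String × Int)) (max_len : Option Int) (out : List Int) : Decidable (Spec_text_to_sequence text vocab max_len out) := by unfold Spec_text_to_sequence; infer_instance

-- ===== CLAIM (what is proved, stated in full; the proofs are below) =====
def Claim_equal_text_to_sequence : Prop := ∀ (text : String) (vocab : List (String × Int)) (max_len : Option Int), Dom_text_to_sequence text vocab max_len → Pre_text_to_sequence text vocab max_len → Spec_text_to_sequence text vocab max_len (text_to_sequence text vocab max_len)

-- ===== LEMMAS AND PROOFS =====

-- B's one position-indexed pass over range(m) equals "take m of the mapped word list, then pad to m".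
lemma pyRangeMap_eq_take_pad (ws : List String) (f : String → Int) (pad : Int) (m : Int)
    (hm : 0 ≤ m) :
    (PySem.List.pyRange 0 m 1).map (fun i =>
        if i < (ws.length : Int) then f (PySem.List.pyGetD ws i "") else pad)
      = (ws.map f).take m.toNat ++ List.replicate (m.toNat - ws.length) pad := by
  apply List.ext_getElem
  · simp [PySem.List.length_pyRange_one]; omega
  · intro k hk hk'
    have hkm : k < m.toNat := by
      simpa [PySem.List.length_pyRange_one] using hk
    rw [List.getElem_map, PySem.List.getElem_pyRange_one]
    simp only [zero_add]
    by_cases h : k < ws.length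
    · rw [if_pos (by exact_mod_cast h),
        List.getElem_append_left (by simp; omega),
        List.getElem_take, List.getElem_map,
        PySem.List.pyGetD_natCast, List.getD_eq_getElem ws "" h]
    · rw [if_neg (by simpa using h),
        List.getElem_append_right (by simp; omega),
        List.getElem_replicate]

theorem text_to_sequence_spec : Claim_equal_text_to_sequence := by
  intro text vocab max_len _hdom hpre
  unfold Spec_text_to_sequence text_to_sequence text_to_sequence_alt
  obtain ⟨-, hpre2⟩ := hpre
  cases max_len with
  | none => rfl
  | some m =>
    obtain ⟨hm0, -⟩ := hpre2
    simp only [Option.getD_some] at hm0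
    by_cases hm : m = 0
    · simp [hm]
    · simp only [hm, ne_eq, not_false_iff, if_true]
      set d := PySem.Dict.mk vocab
      set ws := PySem.Str.split₀ text
      set f : String → Int := fun w => PySem.Dict.getD d w ((PySem.Dict.get? d "<UNK>").getD 0)
      set pad : Int := (PySem.Dict.get? d "<PAD>").getD 0
      by_cases hmneg : m < 0
      · -- negative max_len inside Pre_: |max_len| ≥ len(words), both sides are []
        have hswall : ((ws.length : Int)) + m ≤ 0 := by
          rcases hm0 with h | h
          · omega
          · exact h
        rw [PySem.List.pyRange_one_eq_nil (by omega), List.map_nil]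
        have h1 : (((ws.map f).length : Int)) > m := by simp; omega
        rw [if_pos h1]
        have hk : (some m : Option Int) = some (-(((-m).toNat : Nat) : Int)) := by
          congr 1; omega
        rw [hk, PySem.List.slice_to_neg_natCast (ws.map f) (-m).toNat (by omega)]
        have hz : (ws.map f).length - (-m).toNat = 0 := by
          rw [List.length_map]; omega
        rw [hz, List.take_zero]
      · have hm0' : 0 ≤ m := by omega
        rw [pyRangeMap_eq_take_pad ws f pad m hm0']
        by_cases hlen : ((ws.length : Int)) < m
        · -- padding branch: len < m, take m is the whole list
          have h1 : ¬ ((((ws.map f).length : Int)) > m) := by simp; omega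
          rw [if_neg h1]
          have h2 : (ws.map f).take m.toNat = ws.map f := by
            apply List.take_of_length_le; simp; omega
          rw [h2]
          congr 1
          simp
        · by_cases heq : ((ws.length : Int)) = m
          · -- len = m: A's else branch with an empty pad, B never reaches the pad position
            have h1 : ¬ ((((ws.map f).length : Int)) > m) := by simp; omega
            rw [if_neg h1]
            have h2 : (ws.map f).take m.toNat = ws.map f := by
              apply List.take_of_length_le; simp; omega
            have h3 : m.toNat - ws.length = 0 := by omega
            have h4 : (m - (((ws.map f).length : Int))).toNat = 0 := by simp; omega
            rw [h3, h4]; simp [h2]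
          · -- strict truncation branch
            have h1 : (((ws.map f).length : Int)) > m := by simp; omega
            rw [if_pos h1, PySem.List.slice_to _ hm0']
            have h3 : m.toNat - ws.length = 0 := by omega
            simp [h3]
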